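-- pv_equiv track=rewrite | github.com/ridhul-cd/Data-Breach-Avoidance-System | utils/Load data to SQL Server/CSVs Failure Recovery Migrator.py | IntervalSplitter
-- ===== SOURCE A (Python) =====
-- def IntervalSplitter(size,x):
--
--     modu=size%x
--     chunk=int((size-modu)/x)
--     start=0
--     end=chunk
--     intervals=[[0 for i in range(2)] for i in range(x)]
--     for i in range(x):
--         if i==0:
--             intervals[i][0]=start
--             intervals[i][1]=end
--         else:
--             intervals[i][0]=intervals[i-1][1]
--             intervals[i][1]=intervals[i-1][1]+end
--     intervals[x-1][1]+=modu
--     return (intervals)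
-- ===== SOURCE B (Python) =====
-- def IntervalSplitter(size, x):
--     modu = size % x
--     chunk = int((size - modu) / x)
--     intervals = [[i * chunk, (i + 1) * chunk] for i in range(x)]
--     intervals[-1][1] += modu
--     return intervals
-- ===== Notes on version B (the rewrite author's own statement) =====
-- stated objective: simpler
-- what changed: Replaces the accumulator-threading loop over a preallocated mutable table (each interval built from the previous one's end) with a direct closed-form per-index comprehension [i*chunk,(i+1)*chunk] plus a single last-element remainder bump.
import Mathlib
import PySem

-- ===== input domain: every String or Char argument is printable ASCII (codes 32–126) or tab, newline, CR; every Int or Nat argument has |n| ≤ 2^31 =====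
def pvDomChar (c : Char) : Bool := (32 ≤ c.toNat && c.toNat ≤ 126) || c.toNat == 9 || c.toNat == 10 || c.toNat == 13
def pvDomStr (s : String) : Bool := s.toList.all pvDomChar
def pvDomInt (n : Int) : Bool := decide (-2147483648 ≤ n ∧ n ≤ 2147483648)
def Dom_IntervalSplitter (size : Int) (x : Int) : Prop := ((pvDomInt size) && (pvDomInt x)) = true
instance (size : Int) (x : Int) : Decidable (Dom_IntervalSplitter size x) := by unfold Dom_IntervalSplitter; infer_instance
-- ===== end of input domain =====

-- B replaces A's accumulator-threading loop over a preallocated table by a direct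
-- closed-form per-index comprehension plus a last-element remainder bump (objective: simpler).

-- ===== PORT A =====
-- loop body: intervals[i][0]=…; intervals[i][1]=…  (reads intervals[i-1][1] for i>0); end = chunk, start = 0
def stepA (endv : Int) (acc : List (List Int)) (i : Int) : List (List Int) :=
  if i = 0 then
    let r0 := PySem.List.pySetD (PySem.List.pyGetD acc i []) 0 0
    let r1 := PySem.List.pySetD r0 1 endv
    PySem.List.pySetD acc i r1
  else
    let prev := PySem.List.pyGetD (PySem.List.pyGetD acc (i - 1) []) 1 0
    let r0 := PySem.List.pySetD (PySem.List.pyGetD acc i []) 0 prev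
    let r1 := PySem.List.pySetD r0 1 (prev + endv)
    PySem.List.pySetD acc i r1

def IntervalSplitter (size : Int) (x : Int) : List (List Int) :=
  let modu := PySem.Int.mod size x
  -- int((size-modu)/x): float true division then int(); exact on |·| ≤ 2^32 < 2^53 (PySem.Int.truncdiv)
  let chunk := PySem.Int.truncdiv (size - modu) x
  let endv := chunk
  let init := (PySem.List.pyRange 0 x 1).map (fun _ => (PySem.List.pyRange 0 2 1).map (fun _ => (0 : Int)))
  let intervals := (PySem.List.pyRange 0 x 1).foldl (stepA endv) init
  -- intervals[x-1][1] += modu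
  let last := PySem.List.pyGetD intervals (x - 1) []
  PySem.List.pySetD intervals (x - 1) (PySem.List.pySetD last 1 (PySem.List.pyGetD last 1 0 + modu))

-- ===== PORT B =====
-- intervals[-1][1] += modu, done structurally on the last element
def bumpLast (m : Int) : List (List Int) → List (List Int)
  | [] => []
  | [iv] => [PySem.List.pySetD iv 1 (PySem.List.pyGetD iv 1 0 + m)]
  | iv :: rest => iv :: bumpLast m rest

def IntervalSplitter_alt (size : Int) (x : Int) : List (List Int) :=
  let modu := PySem.Int.mod size x
  let chunk := PySem.Int.truncdiv (size - modu) x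
  bumpLast modu ((PySem.List.pyRange 0 x 1).map (fun i => [i * chunk, (i + 1) * chunk]))

-- ===== PRECONDITION & SPEC =====
-- A raises on x ≤ 0 (ZeroDivisionError at size % 0, IndexError on intervals[x-1] for x < 0); excluded.
def Pre_IntervalSplitter (size : Int) (x : Int) : Prop := 1 ≤ x
instance (size : Int) (x : Int) : Decidable (Pre_IntervalSplitter size x) := by unfold Pre_IntervalSplitter; infer_instance
def pvWitness_IntervalSplitter : Int × Int := (7, 3)

def Spec_IntervalSplitter (size : Int) (x : Int) (out : List (List Int)) : Prop := out = IntervalSplitter_alt size x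
instance (size : Int) (x : Int) (out : List (List Int)) : Decidable (Spec_IntervalSplitter size x out) := by unfold Spec_IntervalSplitter; infer_instance

-- ===== CLAIM (what is proved, stated in full; the proofs are below) =====
def Claim_equal_IntervalSplitter : Prop := ∀ (size : Int) (x : Int), Dom_IntervalSplitter size x → Pre_IntervalSplitter size x → Spec_IntervalSplitter size x (IntervalSplitter size x)

-- ===== LEMMAS AND PROOFS =====

theorem set_append_mid (ys zs : List (List Int)) (v : List Int) (z : List Int) :
    (ys ++ z :: zs).set ys.length v = ys ++ v :: zs := by
  induction ys with
  | nil => simp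
  | cons a t ih => simp [ih]

theorem getD_append_mid (ys zs : List (List Int)) (z d : List Int) :
    (ys ++ z :: zs).getD ys.length d = z := by
  simp [List.getD_eq_getElem?_getD]

theorem fold_inv (c : Int) (k n : Nat) (hk : 1 ≤ k) (hkn : k ≤ n) :
    (PySem.List.pyRange 0 (k:Int) 1).foldl (stepA c)
      ((PySem.List.pyRange 0 (n:Int) 1).map (fun _ => (PySem.List.pyRange 0 2 1).map (fun _ => (0:Int))))
    = (PySem.List.pyRange 0 (k:Int) 1).map (fun i => [i * c, (i + 1) * c])
      ++ (PySem.List.pyRange (k:Int) (n:Int) 1).map (fun _ => (PySem.List.pyRange 0 2 1).map (fun _ => (0:Int))) := by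
  induction k with
  | zero => omega
  | succ k ih =>
    rcases Nat.eq_or_lt_of_le hk with h1 | h1
    · have hk0 : k = 0 := by omega
      subst hk0
      have hn : (0:Int) < (n:Int) := by exact_mod_cast (by omega : 0 < n)
      have h01 : PySem.List.pyRange 0 1 1 = [0] := by decide
      have h02 : (PySem.List.pyRange 0 2 1).map (fun _ => (0:Int)) = [0,0] := by decide
      rw [PySem.List.pyRange_one_cons hn]
      simp only [Nat.cast_one, zero_add, h01, h02]
      norm_num [List.map_cons, List.foldl_cons, List.foldl_nil, List.map_nil]
      rw [stepA]
      simp only [PySem.List.pyGetD_zero_cons]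
      rw [PySem.List.pySetD_of_nonneg _ _ (by norm_num)]
      norm_num [PySem.List.pySetD, PySem.List.pySet?, PySem.List.pyIdx?]
    · have hk1 : 1 ≤ k := by omega
      have hkn2 : (k:Int) < (n:Int) := by exact_mod_cast (by omega : k < n)
      have hsplit : PySem.List.pyRange 0 ((k:Int)+1) 1 = PySem.List.pyRange 0 (k:Int) 1 ++ [(k:Int)] :=
        PySem.List.pyRange_one_succ_right (by positivity)
      have hcast : ((k+1 : Nat) : Int) = (k:Int) + 1 := by push_cast; ring
      rw [hcast, hsplit, List.foldl_append, ih hk1 (by omega)]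
      simp only [List.foldl_cons, List.foldl_nil]
      rw [PySem.List.pyRange_one_cons hkn2, List.map_cons]
      set M := (PySem.List.pyRange 0 (k:Int) 1).map (fun i => [i * c, (i + 1) * c]) with hM
      have hMlen : M.length = k := by
        simp [hM, PySem.List.length_pyRange_one]
      have hknz : ¬ ((k:Int) = 0) := by exact_mod_cast (by omega : ¬ (k = 0))
      rw [stepA]
      simp only [if_neg hknz]
      have hprev : PySem.List.pyGetD (PySem.List.pyGetD
          (M ++ (PySem.List.pyRange 0 2 1).map (fun _ => (0:Int)) ::
            (PySem.List.pyRange ((k:Int)+1) (n:Int) 1).map (fun _ => (PySem.List.pyRange 0 2 1).map (fun _ => (0:Int))))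
          ((k:Int) - 1) []) 1 0 = (k:Int) * c := by
        have h1' : ((k:Int) - 1) = ((k-1 : Nat) : Int) := by push_cast [hk1]; ring
        rw [h1', PySem.List.pyGetD_natCast, List.getD_append _ _ _ _ (by omega)]
        rw [hM, ← PySem.List.pyGetD_natCast, PySem.List.pyGetD_map_pyRange _ _ _ _ (by omega)]
        have h2' : ((k-1:Nat):Int) + 1 = (k:Int) := by push_cast [hk1]; ring
        rw [h2']
        simp [PySem.List.pyGetD]
      rw [hprev]
      have hb : PySem.List.pyGetD
          (M ++ (PySem.List.pyRange 0 2 1).map (fun _ => (0:Int)) ::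
            (PySem.List.pyRange ((k:Int)+1) (n:Int) 1).map (fun _ => (PySem.List.pyRange 0 2 1).map (fun _ => (0:Int))))
          (k:Int) [] = (PySem.List.pyRange 0 2 1).map (fun _ => (0:Int)) := by
        rw [PySem.List.pyGetD_natCast, ← hMlen, getD_append_mid]
      rw [hb]
      rw [PySem.List.pySetD_of_nonneg _ _ (by positivity)]
      have hkt : ((k:Int)).toNat = M.length := by omega
      rw [hkt, set_append_mid]
      rw [List.map_append, List.append_assoc]
      congr 1
      simp only [List.map_cons, List.map_nil, List.singleton_append]
      congr 1
      have h02 : (PySem.List.pyRange 0 2 1).map (fun _ => (0:Int)) = [0,0] := by decide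
      rw [h02]
      norm_num [PySem.List.pySetD, PySem.List.pySet?, PySem.List.pyIdx?]
      ring

theorem bumpLast_append (m : Int) (ys : List (List Int)) (z : List Int) :
    bumpLast m (ys ++ [z]) = ys ++ [PySem.List.pySetD z 1 (PySem.List.pyGetD z 1 0 + m)] := by
  induction ys with
  | nil => simp [bumpLast]
  | cons a t ih =>
    cases t with
    | nil => simp [bumpLast]
    | cons b t' => simpa [bumpLast] using ih

theorem main_eq (size x : Int) (hpre : 1 ≤ x) :
    IntervalSplitter size x = IntervalSplitter_alt size x := by
  obtain ⟨n, hn⟩ : ∃ n : Nat, x = (n:Int) := ⟨x.toNat, by omega⟩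
  subst hn
  have hn1 : 1 ≤ n := by exact_mod_cast hpre
  simp only [IntervalSplitter, IntervalSplitter_alt]
  rw [fold_inv _ n n hn1 le_rfl, PySem.List.pyRange_one_eq_nil le_rfl]
  simp only [List.map_nil, List.append_nil]
  have hsplit : PySem.List.pyRange 0 (n:Int) 1
      = PySem.List.pyRange 0 ((n-1:Nat):Int) 1 ++ [((n-1:Nat):Int)] := by
    have h : (n:Int) = ((n-1:Nat):Int) + 1 := by push_cast [hn1]; ring
    rw [h]; exact PySem.List.pyRange_one_succ_right (by positivity)
  rw [hsplit, List.map_append]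
  simp only [List.map_cons, List.map_nil]
  set c := PySem.Int.truncdiv (size - PySem.Int.mod size (n:Int)) (n:Int) with hc
  set M' := (PySem.List.pyRange 0 ((n-1:Nat):Int) 1).map (fun i => [i * c, (i + 1) * c]) with hM'
  have hlen : M'.length = n - 1 := by simp [hM', PySem.List.length_pyRange_one]
  have hx1 : (n:Int) - 1 = ((n-1:Nat):Int) := by push_cast [hn1]; ring
  rw [bumpLast_append, hx1]
  rw [PySem.List.pyGetD_natCast, ← hlen, getD_append_mid]
  rw [PySem.List.pySetD_natCast]
  exact set_append_mid M' [] _ _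

-- ===== VERDICT (by name: the statement is the Claim_ definition above) =====
theorem IntervalSplitter_spec : Claim_equal_IntervalSplitter := by
  intro size x _ hpre
  show IntervalSplitter size x = IntervalSplitter_alt size x
  exact main_eq size x hpre
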